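-- pv_equiv track=rewrite | github.com/gcgarrett/exercises | canPlantFlowers/canPlantFlowers.py | canPlantFlowers
-- ===== SOURCE A (Python) =====
-- class NoSpaceError(Exception): pass
--
-- def spaceAvailable(flowers, index):
--     if flowers[index] != 1:
--         leftIndex = index - 1
--         rightIndex = index + 1
--         leftEmpty = True
--         rightEmpty = True
--
--         if leftIndex >= 0 and flowers[leftIndex] == 1:
--             leftEmpty = False
--
--         if rightIndex < len(flowers) and flowers[rightIndex] == 1:
--             rightEmpty = False
--
--         return leftEmpty and rightEmpty
--
--     return False
--
-- def findNextSpace(flowers):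
--     for index, value in enumerate(flowers):
--         if spaceAvailable(flowers, index):
--             return index
--
--     return -1
--
-- def plantFlower(flowers):
--     plantIndex = findNextSpace(flowers)
--
--     if plantIndex > -1:
--         flowers[plantIndex] = 1
--     else:
--         raise NoSpaceError
--
--     return flowers
--
-- def canPlantFlowers(flowers, additionalCount):
--     try:
--         while(additionalCount > 0):
--             plantFlower(flowers)
--             additionalCount -= 1
--     except NoSpaceError:
--         return False
--
--     return True
-- ===== SOURCE B (Python) =====
-- def canPlantFlowers(flowers, additionalCount):
--     # Single left-to-right greedy pass: count plantable slots, then compare.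
--     # (Unlike A, does not mutate `flowers`.)
--     count = 0
--     prev = False  # is the cell to the left occupied (original or just planted)?
--     n = len(flowers)
--     for i in range(n):
--         if flowers[i] == 1:
--             prev = True
--         elif prev or (i + 1 < n and flowers[i + 1] == 1):
--             prev = False
--         else:
--             count += 1
--             prev = True
--     return count >= additionalCount
-- ===== Notes on version B (the rewrite author's own statement) =====
-- stated objective: faster
-- what changed: A repeatedly rescans the whole bed from index 0 (with index arithmetic into the full list) to plant one flower at a time, additionalCount times; B makes a single left-to-right greedy pass carrying a 'previous cell occupied' flag, counts all plantable slots once, and compares the count to additionalCount.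
import Mathlib
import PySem

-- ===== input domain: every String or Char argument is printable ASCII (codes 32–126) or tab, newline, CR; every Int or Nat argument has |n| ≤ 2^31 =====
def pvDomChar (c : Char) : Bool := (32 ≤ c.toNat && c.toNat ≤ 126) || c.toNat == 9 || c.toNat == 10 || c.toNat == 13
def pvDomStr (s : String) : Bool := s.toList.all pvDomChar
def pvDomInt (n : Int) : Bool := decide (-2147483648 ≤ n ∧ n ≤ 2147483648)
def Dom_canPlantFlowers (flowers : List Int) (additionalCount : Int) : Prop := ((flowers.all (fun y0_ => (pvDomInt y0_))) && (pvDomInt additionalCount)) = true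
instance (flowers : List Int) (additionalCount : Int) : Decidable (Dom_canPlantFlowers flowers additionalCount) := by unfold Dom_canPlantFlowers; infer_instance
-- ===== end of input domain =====

-- B replaces A's repeated plant-one-flower-and-rescan loop by a single left-to-right
-- greedy pass that counts plantable slots and compares the count to additionalCount
-- (objective: faster). A mutates its `flowers` argument in place; B does not — the
-- equivalence proved here is about the RETURN value only.

-- ===== PORT A =====

-- flowers[index] is only evaluated at indices produced by enumerate, which are in
-- range, so the `none` (IndexError) branch of pyGet? is unreachable at call sites.
def spaceAvailable (flowers : List Int) (index : Int) : Bool :=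
  match PySem.List.pyGet? flowers index with
  | none => false   -- unreachable at call sites (index from enumerate is in range)
  | some v =>
    if v != 1 then
      let leftIndex := index - 1
      let rightIndex := index + 1
      -- `leftIndex >= 0 and flowers[leftIndex] == 1` (short-circuit, so no raise)
      let leftEmpty := !(decide (leftIndex ≥ 0) && (PySem.List.pyGet? flowers leftIndex == some 1))
      let rightEmpty := !(decide (rightIndex < (flowers.length : Int)) && (PySem.List.pyGet? flowers rightIndex == some 1))
      leftEmpty && rightEmpty
    else
      false

-- the `for index, value in enumerate(flowers)` loop with early return
def findNextSpaceAux (flowers : List Int) : List (Int × Int) → Int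
  | [] => -1
  | (i, _v) :: rest => if spaceAvailable flowers i then i else findNextSpaceAux flowers rest

def findNextSpace (flowers : List Int) : Int :=
  findNextSpaceAux flowers (PySem.List.enumerate flowers)

-- `none` models the raised NoSpaceError; `flowers[plantIndex] = 1` is List.set
def plantFlower (flowers : List Int) : Option (List Int) :=
  let plantIndex := findNextSpace flowers
  if plantIndex > -1 then some (flowers.set plantIndex.toNat 1) else none

-- the `while additionalCount > 0` loop (ticks down exactly additionalCount.toNat times)
def canPlantLoop (flowers : List Int) : Nat → Bool
  | 0 => true
  | n + 1 =>
    match plantFlower flowers with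
    | none => false
    | some f => canPlantLoop f n

def canPlantFlowers (flowers : List Int) (additionalCount : Int) : Bool :=
  canPlantLoop flowers additionalCount.toNat

-- ===== PORT B =====

-- B's `for i in range(n)` loop, carrying the count and the prev flag;
-- flowers[i] / flowers[i+1] are only read at in-range indices (guarded), where
-- `flowers[j] == 1` is exactly `pyGet? flowers j == some 1`.
def bLoop (flowers : List Int) (n : Nat) (i : Nat) (prev : Bool) (count : Int) : Int :=
  if i < n then
    if PySem.List.pyGet? flowers (i : Int) == some 1 then
      bLoop flowers n (i + 1) true count
    else if prev || (decide (i + 1 < n) && (PySem.List.pyGet? flowers ((i : Int) + 1) == some 1)) then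
      bLoop flowers n (i + 1) false count
    else
      bLoop flowers n (i + 1) true (count + 1)
  else
    count
  termination_by n - i

def canPlantFlowers_alt (flowers : List Int) (additionalCount : Int) : Bool :=
  decide (bLoop flowers flowers.length 0 false 0 ≥ additionalCount)

-- ===== PRECONDITION & SPEC =====
def Spec_canPlantFlowers (flowers : List Int) (additionalCount : Int) (out : Bool) : Prop := out = canPlantFlowers_alt flowers additionalCount
instance (flowers : List Int) (additionalCount : Int) (out : Bool) : Decidable (Spec_canPlantFlowers flowers additionalCount out) := by unfold Spec_canPlantFlowers; infer_instance

-- ===== CLAIM (what is proved, stated in full; the proofs are below) =====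
def Claim_equal_canPlantFlowers : Prop := ∀ (flowers : List Int) (additionalCount : Int), Dom_canPlantFlowers flowers additionalCount → Spec_canPlantFlowers flowers additionalCount (canPlantFlowers flowers additionalCount)

-- ===== LEMMAS AND PROOFS =====

-- structural restatement of B's counting pass (proof-only helper)
def headIs1 : List Int → Bool
  | [] => false
  | r :: _ => r == 1

def altCount : List Int → Bool → Int → Int
  | [], _, count => count
  | cur :: rest, prev, count =>
    if cur == 1 then altCount rest true count
    else if prev || headIs1 rest then altCount rest false count
    else altCount rest true (count + 1)

theorem bLoop_eq_altCount : ∀ (suf pre : List Int) (prev : Bool) (count : Int),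
    bLoop (pre ++ suf) (pre ++ suf).length pre.length prev count = altCount suf prev count := by
  intro suf
  induction suf with
  | nil =>
    intro pre prev count
    rw [bLoop]
    simp [altCount]
  | cons x rest ih =>
    intro pre prev count
    have hlt : pre.length < (pre ++ x :: rest).length := by simp
    have hget : PySem.List.pyGet? (pre ++ x :: rest) (pre.length : Int) = some x :=
      PySem.List.pyGet?_append_length pre rest x
    have hsnoc : pre ++ x :: rest = (pre ++ [x]) ++ rest := by simp
    have hlen1 : pre.length + 1 = (pre ++ [x]).length := by simp
    have hhead : (decide (pre.length + 1 < (pre ++ x :: rest).length) &&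
        (PySem.List.pyGet? (pre ++ x :: rest) ((pre.length : Int) + 1) == some 1)) = headIs1 rest := by
      rw [show ((pre.length : Int) + 1) = ((pre.length : Int) + ((1 : Nat) : Int)) by norm_num,
        PySem.List.pyGet?_append_right]
      cases rest with
      | nil => simp [headIs1]
      | cons r rr =>
        have h1 : pre.length + 1 < (pre ++ x :: r :: rr).length := by simp
        simp only [decide_eq_true h1, Bool.true_and]
        by_cases hr : r = 1 <;> simp [headIs1, hr]
    rw [bLoop, if_pos hlt, hget]
    by_cases hx : x = 1
    · rw [if_pos (show (some x == some 1) = true by simp [hx])]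
      rw [hlen1, show (pre ++ x :: rest).length = ((pre ++ [x]) ++ rest).length by simp,
        hsnoc, ih (pre ++ [x])]
      simp [altCount, hx]
    · rw [if_neg (show ¬((some x == some 1) = true) by simp [hx]), hhead]
      by_cases hc : (prev || headIs1 rest) = true
      · rw [if_pos hc]
        rw [hlen1, show (pre ++ x :: rest).length = ((pre ++ [x]) ++ rest).length by simp,
          hsnoc, ih (pre ++ [x])]
        simp only [altCount, if_neg (show ¬((x == 1) = true) by simp [hx]), if_pos hc]
      · rw [if_neg hc]
        rw [hlen1, show (pre ++ x :: rest).length = ((pre ++ [x]) ++ rest).length by simp,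
          hsnoc, ih (pre ++ [x])]
        simp only [altCount, if_neg (show ¬((x == 1) = true) by simp [hx]), if_neg hc]


-- structural description of A's leftmost plantable index (proof-only helper)
def firstIdx : List Int → Bool → Option Nat
  | [], _ => none
  | x :: rest, prev =>
    if x == 1 then (firstIdx rest true).map (· + 1)
    else if prev || headIs1 rest then (firstIdx rest false).map (· + 1)
    else some 0

def lastIs1 (pre : List Int) : Bool :=
  match pre.getLast? with
  | some v => v == 1
  | none => false

theorem altCount_acc (xs : List Int) : ∀ (prev : Bool) (c : Int),
    altCount xs prev c = altCount xs prev 0 + c := by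
  induction xs with
  | nil => intro prev c; simp [altCount]
  | cons x rest ih =>
    intro prev c
    simp only [altCount]
    split_ifs with h1 h2
    · rw [ih true c]
    · rw [ih false c]
    · rw [ih true (c + 1), ih true (0 + 1)]; ring

theorem altCount_nonneg (xs : List Int) : ∀ (prev : Bool), 0 ≤ altCount xs prev 0 := by
  induction xs with
  | nil => intro prev; simp [altCount]
  | cons x rest ih =>
    intro prev
    simp only [altCount]
    split_ifs with h1 h2
    · exact ih true
    · exact ih false
    · rw [altCount_acc]; have := ih true; omega

theorem firstIdx_none_iff (xs : List Int) : ∀ (prev : Bool),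
    firstIdx xs prev = none ↔ altCount xs prev 0 = 0 := by
  induction xs with
  | nil => intro prev; simp [firstIdx, altCount]
  | cons x rest ih =>
    intro prev
    simp only [firstIdx, altCount]
    split_ifs with h1 h2
    · simpa using ih true
    · simpa using ih false
    · rw [altCount_acc]
      have := altCount_nonneg rest true
      constructor
      · intro h; simp at h
      · intro h; omega

theorem firstIdx_set (xs : List Int) : ∀ (prev : Bool) (k : Nat),
    firstIdx xs prev = some k →
    altCount (xs.set k 1) prev 0 = altCount xs prev 0 - 1 := by
  induction xs with
  | nil => intro prev k h; simp [firstIdx] at h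
  | cons x rest ih =>
    intro prev k h
    simp only [firstIdx] at h
    split_ifs at h with h1 h2
    · -- x == 1 : planted inside rest at j, k = j + 1
      rcases Option.map_eq_some_iff.mp h with ⟨j, hj, hk⟩
      subst hk
      simp only [List.set_cons_succ, altCount, if_pos h1]
      exact ih true j hj
    · -- x ≠ 1 but slot not available : planted inside rest at j, k = j + 1
      rcases Option.map_eq_some_iff.mp h with ⟨j, hj, hk⟩
      subst hk
      have hcond : (prev || headIs1 (rest.set j 1)) = true := by
        rcases Bool.or_eq_true_iff.mp h2 with hp | hh
        · simp [hp]
        · -- rest starts with 1, so firstIdx rest false cannot be 0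
          cases rest with
          | nil => simp [headIs1] at hh
          | cons r rr =>
            have hr : r = 1 := by simpa [headIs1] using hh
            subst hr
            cases j with
            | zero =>
              exfalso
              simp [firstIdx] at hj
            | succ j' => simp [headIs1]
      simp only [List.set_cons_succ, altCount, if_neg h1, if_pos hcond, if_pos h2]
      exact ih false j hj
    · -- slot available here : k = 0, plant at the head
      have hk : k = 0 := by simpa using h.symm
      subst hk
      have hL : altCount ((x :: rest).set 0 1) prev 0 = altCount rest true 0 := by
        simp [altCount]
      rw [hL]
      simp only [altCount, if_neg h1, if_neg h2]
      have := altCount_acc rest true (0 + 1)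
      omega

theorem lastIs1_snoc (pre : List Int) (a : Int) : lastIs1 (pre ++ [a]) = (a == 1) := by
  simp [lastIs1]

theorem spaceAvailable_split (pre : List Int) (x : Int) (rest : List Int) :
    spaceAvailable (pre ++ x :: rest) (pre.length : Int)
      = (!(x == 1) && !(lastIs1 pre) && !(headIs1 rest)) := by
  unfold spaceAvailable
  rw [PySem.List.pyGet?_append_length]
  dsimp only
  by_cases hx : x = 1
  · simp [hx]
  · rw [if_pos (show (x != 1) = true by simp [hx])]
    have hleft : (decide ((pre.length : Int) - 1 ≥ 0) &&
        (PySem.List.pyGet? (pre ++ x :: rest) ((pre.length : Int) - 1) == some 1))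
        = lastIs1 pre := by
      rcases List.eq_nil_or_concat pre with rfl | ⟨pre', a, rfl⟩
      · simp [lastIs1]
      · simp only [List.concat_eq_append]
        have hlen : (((pre' ++ [a]).length : Nat) : Int) - 1 = (pre'.length : Int) := by
          simp
        rw [hlen, show pre' ++ [a] ++ x :: rest = pre' ++ a :: x :: rest by simp,
          PySem.List.pyGet?_append_length, lastIs1_snoc]
        by_cases ha : a = 1 <;> simp [ha]
    have hright : (decide ((pre.length : Int) + 1 < (((pre ++ x :: rest).length : Nat) : Int)) &&
        (PySem.List.pyGet? (pre ++ x :: rest) ((pre.length : Int) + 1) == some 1))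
        = headIs1 rest := by
      rw [show ((pre.length : Int) + 1) = ((pre.length : Int) + ((1 : Nat) : Int)) by norm_num,
        PySem.List.pyGet?_append_right]
      cases rest with
      | nil => simp [headIs1]
      | cons r rr =>
        have hlt : (pre.length : Int) + ((1:Nat) : Int) < (((pre ++ x :: r :: rr).length : Nat) : Int) := by
          simp
        simp only [decide_eq_true hlt, Bool.true_and]
        by_cases hr : r = 1 <;> simp [headIs1, hr]
    rw [hleft, hright]
    simp [show (x == 1) = false by simp [hx]]


theorem firstIdx_cons_one {x : Int} (rest : List Int) (prev : Bool) (h : x = 1) :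
    firstIdx (x :: rest) prev = (firstIdx rest true).map (· + 1) := by
  simp [firstIdx, h]

theorem firstIdx_cons_blocked {x : Int} {rest : List Int} {prev : Bool} (h : x ≠ 1)
    (h2 : (prev || headIs1 rest) = true) :
    firstIdx (x :: rest) prev = (firstIdx rest false).map (· + 1) := by
  simp [firstIdx, h, h2]

theorem firstIdx_cons_avail {x : Int} {rest : List Int} {prev : Bool} (h : x ≠ 1)
    (h2 : (prev || headIs1 rest) = false) :
    firstIdx (x :: rest) prev = some 0 := by
  simp [firstIdx, h, h2]

theorem findNextSpaceAux_split : ∀ (suf pre : List Int),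
    findNextSpaceAux (pre ++ suf) (PySem.List.enumerate suf (pre.length : Int))
      = (match firstIdx suf (lastIs1 pre) with
         | none => -1
         | some k => ((pre.length : Int) + (k : Int))) := by
  intro suf
  induction suf with
  | nil => intro pre; simp [PySem.List.enumerate_nil, findNextSpaceAux, firstIdx]
  | cons x rest ih =>
    intro pre
    rw [PySem.List.enumerate_cons]
    simp only [findNextSpaceAux]
    rw [spaceAvailable_split]
    have hpre : pre ++ x :: rest = (pre ++ [x]) ++ rest := by simp
    have hlen : ((pre.length : Int) + 1) = (((pre ++ [x]).length : Nat) : Int) := by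
      simp
    have ih' := ih (pre ++ [x])
    rw [lastIs1_snoc] at ih'
    by_cases hx : x = 1
    · -- occupied: not available, recurse with prev = true
      rw [if_neg (show ¬((!(x == 1) && !(lastIs1 pre) && !(headIs1 rest)) = true) by simp [hx])]
      rw [show (x == 1) = true by simp [hx]] at ih'
      rw [hpre, hlen, ih', firstIdx_cons_one rest (lastIs1 pre) hx]
      cases h : firstIdx rest true with
      | none => simp
      | some j => simp; ring
    · have hxb : (x == 1) = false := by simp [hx]
      rw [hxb] at ih'
      by_cases hcond : (lastIs1 pre || headIs1 rest) = true
      · -- blocked by a neighbour: recurse with prev = false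
        rw [if_neg (show ¬((!(x == 1) && !(lastIs1 pre) && !(headIs1 rest)) = true) by
          rcases Bool.or_eq_true_iff.mp hcond with h | h <;> simp [h])]
        rw [hpre, hlen, ih', firstIdx_cons_blocked hx hcond]
        cases h : firstIdx rest false with
        | none => simp
        | some j => simp; ring
      · -- available here
        have hcond' : (lastIs1 pre || headIs1 rest) = false := by
          simpa using hcond
        rcases Bool.or_eq_false_iff.mp hcond' with ⟨hl, hh⟩
        rw [if_pos (show (!(x == 1) && !(lastIs1 pre) && !(headIs1 rest)) = true by
          simp [hx, hl, hh])]
        rw [firstIdx_cons_avail hx hcond']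
        simp

theorem plantFlower_eq (xs : List Int) :
    plantFlower xs = (firstIdx xs false).map (fun k => xs.set k 1) := by
  unfold plantFlower findNextSpace
  have h0 : PySem.List.enumerate xs = PySem.List.enumerate xs (([] : List Int).length : Int) := by
    simp [PySem.List.enumerate]
  have := findNextSpaceAux_split xs []
  simp only [List.nil_append, List.length_nil, Nat.cast_zero] at this
  rw [h0]
  simp only [List.length_nil, Nat.cast_zero]
  rw [this]
  have hlast : lastIs1 [] = false := by rfl
  rw [hlast]
  cases h : firstIdx xs false with
  | none => simp
  | some k =>
    rw [show (match some k with | none => (-1 : Int) | some k => 0 + (k : Int)) = (k : Int) by simp]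
    rw [if_pos (show (k : Int) > -1 by omega)]
    simp

theorem canPlantLoop_eq : ∀ (n : Nat) (xs : List Int),
    canPlantLoop xs n = decide ((n : Int) ≤ altCount xs false 0) := by
  intro n
  induction n with
  | zero =>
    intro xs
    simp [canPlantLoop, altCount_nonneg xs false]
  | succ n ih =>
    intro xs
    simp only [canPlantLoop]
    rw [plantFlower_eq]
    cases h : firstIdx xs false with
    | none =>
      have hz : altCount xs false 0 = 0 := (firstIdx_none_iff xs false).mp h
      simp [hz]
    | some k =>
      have hset := firstIdx_set xs false k h
      have hnn := altCount_nonneg (xs.set k 1) false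
      simp only [Option.map_some]
      rw [ih (xs.set k 1), hset]
      have : ((n : Int) ≤ altCount xs false 0 - 1) ↔ (((n : Nat) + 1 : Int) ≤ altCount xs false 0) := by omega
      simp only [decide_eq_decide]
      push_cast
      omega

-- ===== VERDICT (by name: the statement is the Claim_ definition above) =====
theorem canPlantFlowers_spec : Claim_equal_canPlantFlowers := by
  intro flowers additionalCount _
  unfold Spec_canPlantFlowers canPlantFlowers canPlantFlowers_alt
  rw [canPlantLoop_eq]
  rw [show bLoop flowers flowers.length 0 false 0
      = altCount flowers false 0 by
        have h := bLoop_eq_altCount flowers [] false 0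
        simpa using h]
  have hnn := altCount_nonneg flowers false
  simp only [decide_eq_decide, ge_iff_le]
  omega
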